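-- pv_equiv track=rewrite | github.com/Sandvik/mine-penge | mine-penge/backend/scraper.py | is_generic_content
-- ===== SOURCE A (Python) =====
-- def is_generic_content(text: str, title: str) -> bool:
--     """Check if content is generic or template-like"""
--     text_lower = text.lower()
--     title_lower = title.lower()
--
--     # Check for generic phrases
--     generic_phrases = [
--         'nyheder', 'seneste', 'breaking', 'live', 'direkte',
--         'forside', 'hjem', 'om os', 'kontakt', 'priser', 'shop',
--         'log ind', 'tilmeld', 'abonner', 'newsletter',
--         'cookies', 'privatlivspolitik', 'handelsbetingelser',
--         'sitemap', 'rss', 'feed', 'arkiv', 'kategori'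
--     ]
--
--     for phrase in generic_phrases:
--         if phrase in text_lower or phrase in title_lower:
--             return True
--
--     # Check for very short or repetitive content
--     if len(text) < 200 or len(set(text.split())) < 50:
--         return True
--
--     return False
-- ===== SOURCE B (Python) =====
-- _PHRASES = [
--     'nyheder', 'seneste', 'breaking', 'live', 'direkte',
--     'forside', 'hjem', 'om os', 'kontakt', 'priser', 'shop',
--     'log ind', 'tilmeld', 'abonner', 'newsletter',
--     'cookies', 'privatlivspolitik', 'handelsbetingelser',
--     'sitemap', 'rss', 'feed', 'arkiv', 'kategori'
-- ]
--
--
-- def _scan(s):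
--     # single left-to-right pass: at each position try all phrases at once
--     for i in range(len(s) + 1):
--         if any(s.startswith(p, i) for p in _PHRASES):
--             return True
--     return False
--
--
-- def is_generic_content(text: str, title: str) -> bool:
--     if _scan(text.lower()) or _scan(title.lower()):
--         return True
--     return len(text) < 200 or len(set(text.split())) < 50
-- ===== Notes on version B (the rewrite author's own statement) =====
-- stated objective: alternative
-- what changed: Replaces A's 23 sequential per-phrase substring passes over each string with a single left-to-right position scan that tests all phrases at each offset (multi-pattern matching by position instead of phrase-by-phrase containment).
import Mathlib
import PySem

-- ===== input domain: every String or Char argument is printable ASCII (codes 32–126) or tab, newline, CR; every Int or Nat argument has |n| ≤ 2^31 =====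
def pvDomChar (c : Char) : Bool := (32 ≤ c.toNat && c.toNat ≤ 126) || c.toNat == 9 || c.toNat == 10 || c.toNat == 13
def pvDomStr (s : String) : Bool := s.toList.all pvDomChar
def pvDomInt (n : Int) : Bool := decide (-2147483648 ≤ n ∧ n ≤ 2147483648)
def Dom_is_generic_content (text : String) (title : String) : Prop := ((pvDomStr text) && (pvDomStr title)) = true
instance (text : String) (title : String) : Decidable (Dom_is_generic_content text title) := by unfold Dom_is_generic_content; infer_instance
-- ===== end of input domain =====

-- B replaces A's per-phrase substring passes with one positional scan testing all phrases at each offset (alternative algorithm, same cost class).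


-- ===== PORT A =====
def genericPhrases : List String :=
  ["nyheder", "seneste", "breaking", "live", "direkte",
   "forside", "hjem", "om os", "kontakt", "priser", "shop",
   "log ind", "tilmeld", "abonner", "newsletter",
   "cookies", "privatlivspolitik", "handelsbetingelser",
   "sitemap", "rss", "feed", "arkiv", "kategori"]

-- A's for-loop with early return: phrase by phrase, 'phrase in text_lower or phrase in title_lower'
def aPhraseLoop : List String → String → String → Bool
  | [], _, _ => false
  | p :: ps, tl, ti =>
      if PySem.Str.isIn p tl || PySem.Str.isIn p ti then true else aPhraseLoop ps tl ti

def is_generic_content (text : String) (title : String) : Bool :=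
  let text_lower := PySem.Str.lower text
  let title_lower := PySem.Str.lower title
  if aPhraseLoop genericPhrases text_lower title_lower then true
  else if PySem.Str.len text < 200 || ((PySem.Set.ofList (PySem.Str.split₀ text)).length : Int) < 50 then true
  else false

-- ===== PORT B =====
-- B's single positional pass: s.startswith(p, i) for 0 ≤ i ≤ len(s) is 'p is a prefix of s[i:]' (exact on that range)
def bScan (s : String) : Bool :=
  (List.range (s.toList.length + 1)).any fun i =>
    genericPhrases.any fun p => p.toList.isPrefixOf (s.toList.drop i)

def is_generic_content_alt (text : String) (title : String) : Bool :=
  if bScan (PySem.Str.lower text) || bScan (PySem.Str.lower title) then true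
  else PySem.Str.len text < 200 || ((PySem.Set.ofList (PySem.Str.split₀ text)).length : Int) < 50

-- ===== PRECONDITION & SPEC =====
def Spec_is_generic_content (text : String) (title : String) (out : Bool) : Prop := out = is_generic_content_alt text title
instance (text : String) (title : String) (out : Bool) : Decidable (Spec_is_generic_content text title out) := by unfold Spec_is_generic_content; infer_instance

-- ===== CLAIM (what is proved, stated in full; the proofs are below) =====
def Claim_equal_is_generic_content : Prop := ∀ (text : String) (title : String), Dom_is_generic_content text title → Spec_is_generic_content text title (is_generic_content text title)

-- ===== LEMMAS AND PROOFS =====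

theorem aPhraseLoop_eq_any (ps : List String) (tl ti : String) :
    aPhraseLoop ps tl ti = ps.any (fun p => PySem.Str.isIn p tl || PySem.Str.isIn p ti) := by
  induction ps with
  | nil => rfl
  | cons p ps ih =>
      simp only [aPhraseLoop, List.any_cons]
      cases h : (PySem.Str.isIn p tl || PySem.Str.isIn p ti) <;> simp [h, ih]

theorem bScan_eq_any (s : String) :
    bScan s = genericPhrases.any (fun p => PySem.Str.isIn p s) := by
  rw [Bool.eq_iff_iff]
  simp only [bScan, List.any_eq_true, List.mem_range, List.isPrefixOf_iff_prefix,
    PySem.Str.isIn_eq, ← PySem.Chars.exists_prefix_drop_iff_isIn]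
  constructor
  · rintro ⟨i, _, p, hp, hpre⟩
    exact ⟨p, hp, i, hpre⟩
  · rintro ⟨p, hp, j, hpre⟩
    refine ⟨min j s.toList.length, by omega, p, hp, ?_⟩
    rcases le_or_gt j s.toList.length with h | h
    · rw [min_eq_left h]; exact hpre
    · have hd : s.toList.drop j = [] := List.drop_eq_nil_of_le (le_of_lt h)
      rw [hd] at hpre
      have : p.toList = [] := List.prefix_nil.mp hpre
      simp [this]

theorem any_or_split (ps : List String) (f g : String → Bool) :
    ps.any (fun p => f p || g p) = (ps.any f || ps.any g) := by
  rw [Bool.eq_iff_iff]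
  simp only [List.any_eq_true, Bool.or_eq_true]
  constructor
  · rintro ⟨p, hp, h | h⟩
    · exact Or.inl ⟨p, hp, h⟩
    · exact Or.inr ⟨p, hp, h⟩
  · rintro (⟨p, hp, h⟩ | ⟨p, hp, h⟩)
    · exact ⟨p, hp, Or.inl h⟩
    · exact ⟨p, hp, Or.inr h⟩

-- ===== VERDICT (by name: the statement is the Claim_ definition above) =====
theorem is_generic_content_spec : Claim_equal_is_generic_content := by
  intro text title _
  unfold Spec_is_generic_content is_generic_content is_generic_content_alt
  simp only [aPhraseLoop_eq_any, bScan_eq_any, any_or_split]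
  cases h : (genericPhrases.any (fun p => PySem.Str.isIn p (PySem.Str.lower text)) ||
      genericPhrases.any (fun p => PySem.Str.isIn p (PySem.Str.lower title))) <;>
    simp [h]
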